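-- pv_equiv track=rewrite | github.com/LeMaterial/lemat-genbench | scripts/run_benchmarks_single_mlip.py | create_preprocessor_config
-- ===== SOURCE A (Python) =====
-- from typing import Any, Dict, List
--
-- def create_preprocessor_config(
--     benchmark_families: List[str],
--     fingerprint_method: str = "structure-matcher",
--     generate_embedding_plots: bool = False,
-- ) -> Dict[str, Any]:
--     """Create preprocessor configuration based on required benchmark families.
--
--     Note: validity preprocessing is ALWAYS included regardless of families.
--
--     Parameters
--     ----------
--     benchmark_families : List[str]
--         List of benchmark families to run
--     fingerprint_method : str, default="structure-matcher"
--         Fingerprinting method to use. Determines if fingerprint preprocessing is needed.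
--     generate_embedding_plots : bool, default=False
--         Whether to generate embedding plots. If True, enables embeddings preprocessing.
--     """
--     config = {
--         "validity": True,  # ALWAYS run validity preprocessing
--         "distribution": False,
--         "stability": False,
--         "embeddings": False,
--         "fingerprint": False,
--     }
--
--     # Determine which preprocessors are needed
--     for family in benchmark_families:
--         if family in ["distribution", "jsdistance", "mmd", "frechet"]:
--             config["distribution"] = True
--         if family in ["stability", "sun"]:
--             config["stability"] = True
--         if family in ["frechet", "distribution"]:
--             config["embeddings"] = True
--         # Original benchmarks need fingerprint preprocessing (unless using structure matcher)
--         if family in ["novelty", "uniqueness", "sun"]: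
--             # Only run fingerprint preprocessor for BAWL/short-BAWL methods
--             if fingerprint_method.lower() not in ["structure-matcher"]:
--                 config["fingerprint"] = True
--
--     # Enable embeddings preprocessing if embedding plots are requested
--     if generate_embedding_plots:
--         config["embeddings"] = True
--
--     return config
-- ===== SOURCE B (Python) =====
-- # Inverted index: each family name maps to the list of preprocessor flags it enables.
-- FAMILY_FLAGS = {
--     "distribution": ["distribution", "embeddings"],
--     "jsdistance": ["distribution"],
--     "mmd": ["distribution"],
--     "frechet": ["distribution", "embeddings"],
--     "stability": ["stability"],
--     "sun": ["stability", "fingerprint"],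
--     "novelty": ["fingerprint"],
--     "uniqueness": ["fingerprint"],
-- }
--
--
-- def create_preprocessor_config(
--     benchmark_families,
--     fingerprint_method="structure-matcher",
--     generate_embedding_plots=False,
-- ):
--     """Accumulate the set of enabled flags through a family->flags index."""
--     enabled = set()
--     for family in benchmark_families:
--         enabled.update(FAMILY_FLAGS.get(family, []))
--     return {
--         "validity": True,  # ALWAYS run validity preprocessing
--         "distribution": "distribution" in enabled,
--         "stability": "stability" in enabled,
--         "embeddings": "embeddings" in enabled or generate_embedding_plots,
--         "fingerprint": "fingerprint" in enabled
--         and fingerprint_method.lower() not in ["structure-matcher"],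
--     }
-- ===== Notes on version B (the rewrite author's own statement) =====
-- stated objective: alternative
-- what changed: Inverts the control flow: instead of testing each family against four hard-coded membership lists and mutating per-flag booleans, B uses an inverted family->flags index table, accumulates a single set of enabled flag names in one pass, and reads the final dict off that set.
import Mathlib
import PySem

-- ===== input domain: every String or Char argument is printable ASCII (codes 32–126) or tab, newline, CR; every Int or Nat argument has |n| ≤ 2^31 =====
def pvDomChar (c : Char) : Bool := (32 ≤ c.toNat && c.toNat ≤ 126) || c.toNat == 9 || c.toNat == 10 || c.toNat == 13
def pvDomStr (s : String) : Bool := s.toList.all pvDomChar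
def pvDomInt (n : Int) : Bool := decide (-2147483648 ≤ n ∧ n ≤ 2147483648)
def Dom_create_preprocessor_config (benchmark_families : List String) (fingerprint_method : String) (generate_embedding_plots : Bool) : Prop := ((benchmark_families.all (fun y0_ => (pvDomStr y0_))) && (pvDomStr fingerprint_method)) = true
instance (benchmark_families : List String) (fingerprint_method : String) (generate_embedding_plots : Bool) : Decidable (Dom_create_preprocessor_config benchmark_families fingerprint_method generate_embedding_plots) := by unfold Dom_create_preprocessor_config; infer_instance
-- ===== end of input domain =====

-- B inverts the control flow: a family->flags index table and one accumulated set of enabled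
-- flag names replace A's per-flag membership tests with flag mutation (objective: alternative).

-- ===== PORT A =====
def create_preprocessor_config (benchmark_families : List String) (fingerprint_method : String) (generate_embedding_plots : Bool) : List (String × Bool) :=
  let config : PySem.Dict String Bool :=
    PySem.Dict.ofList [("validity", true), ("distribution", false), ("stability", false), ("embeddings", false), ("fingerprint", false)]
  let config := benchmark_families.foldl (fun config family =>
    let config := if family ∈ (["distribution", "jsdistance", "mmd", "frechet"] : List String) then config.insert "distribution" true else config
    let config := if family ∈ (["stability", "sun"] : List String) then config.insert "stability" true else config
    let config := if family ∈ (["frechet", "distribution"] : List String) then config.insert "embeddings" true else config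
    let config := if family ∈ (["novelty", "uniqueness", "sun"] : List String) then
        (if PySem.Str.lower fingerprint_method ∉ (["structure-matcher"] : List String) then config.insert "fingerprint" true else config)
      else config
    config) config
  let config := if generate_embedding_plots then config.insert "embeddings" true else config
  config.items

-- ===== PORT B =====
-- the module-level inverted index FAMILY_FLAGS
def pvFamilyFlags : PySem.Dict String (List String) :=
  PySem.Dict.ofList
    [("distribution", ["distribution", "embeddings"]),
     ("jsdistance", ["distribution"]),
     ("mmd", ["distribution"]),
     ("frechet", ["distribution", "embeddings"]),
     ("stability", ["stability"]),
     ("sun", ["stability", "fingerprint"]),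
     ("novelty", ["fingerprint"]),
     ("uniqueness", ["fingerprint"])]

def create_preprocessor_config_alt (benchmark_families : List String) (fingerprint_method : String) (generate_embedding_plots : Bool) : List (String × Bool) :=
  let enabled : PySem.Set String :=
    benchmark_families.foldl (fun enabled family => PySem.Set.update enabled (pvFamilyFlags.getD family [])) PySem.Set.empty
  [("validity", true),
   ("distribution", decide ("distribution" ∈ enabled)),
   ("stability", decide ("stability" ∈ enabled)),
   ("embeddings", decide ("embeddings" ∈ enabled) || generate_embedding_plots),
   ("fingerprint", decide ("fingerprint" ∈ enabled)
      && !(decide (PySem.Str.lower fingerprint_method ∈ (["structure-matcher"] : List String))))]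

-- ===== PRECONDITION & SPEC =====
def Spec_create_preprocessor_config (benchmark_families : List String) (fingerprint_method : String) (generate_embedding_plots : Bool) (out : List (String × Bool)) : Prop := out = create_preprocessor_config_alt benchmark_families fingerprint_method generate_embedding_plots
instance (benchmark_families : List String) (fingerprint_method : String) (generate_embedding_plots : Bool) (out : List (String × Bool)) : Decidable (Spec_create_preprocessor_config benchmark_families fingerprint_method generate_embedding_plots out) := by unfold Spec_create_preprocessor_config; infer_instance

-- ===== CLAIM =====
def Claim_equal_create_preprocessor_config : Prop := ∀ (benchmark_families : List String) (fingerprint_method : String) (generate_embedding_plots : Bool), Dom_create_preprocessor_config benchmark_families fingerprint_method generate_embedding_plots → Spec_create_preprocessor_config benchmark_families fingerprint_method generate_embedding_plots (create_preprocessor_config benchmark_families fingerprint_method generate_embedding_plots)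

-- ===== LEMMAS AND PROOFS =====

-- A-side: an insert at one of the five fixed keys rewrites that entry in place
lemma step_insert (d s e f v : Bool) (k : String) (hk : k ∈ (["distribution","stability","embeddings","fingerprint"] : List String)) :
    (PySem.Dict.mk [("validity", true), ("distribution", d), ("stability", s), ("embeddings", e), ("fingerprint", f)]).insert k v
    = PySem.Dict.mk [("validity", true),
        ("distribution", if k = "distribution" then v else d),
        ("stability", if k = "stability" then v else s),
        ("embeddings", if k = "embeddings" then v else e),
        ("fingerprint", if k = "fingerprint" then v else f)] := by
  fin_cases hk <;> simp [PySem.Dict.insert]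

-- A-side: one loop iteration ORs in the membership tests of one family
lemma one_step (fm x : String) (d s e f : Bool) :
    (let config := if x ∈ (["distribution", "jsdistance", "mmd", "frechet"] : List String) then (PySem.Dict.mk [("validity", true), ("distribution", d), ("stability", s), ("embeddings", e), ("fingerprint", f)]).insert "distribution" true else PySem.Dict.mk [("validity", true), ("distribution", d), ("stability", s), ("embeddings", e), ("fingerprint", f)]
     let config := if x ∈ (["stability", "sun"] : List String) then config.insert "stability" true else config
     let config := if x ∈ (["frechet", "distribution"] : List String) then config.insert "embeddings" true else config
     let config := if x ∈ (["novelty", "uniqueness", "sun"] : List String) then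
         (if PySem.Str.lower fm ∉ (["structure-matcher"] : List String) then config.insert "fingerprint" true else config)
       else config
     config)
    = PySem.Dict.mk [("validity", true),
        ("distribution", d || decide (x ∈ (["distribution", "jsdistance", "mmd", "frechet"] : List String))),
        ("stability", s || decide (x ∈ (["stability", "sun"] : List String))),
        ("embeddings", e || decide (x ∈ (["frechet", "distribution"] : List String))),
        ("fingerprint", f || (decide (x ∈ (["novelty", "uniqueness", "sun"] : List String))
            && !(decide (PySem.Str.lower fm ∈ (["structure-matcher"] : List String)))))] := by
  split_ifs <;> simp_all [step_insert]

-- A-side: the fold over families computes the pointwise "or of any-membership"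
lemma foldA (fm : String) (l : List String) (d s e f : Bool) :
    l.foldl (fun config family =>
      let config := if family ∈ (["distribution", "jsdistance", "mmd", "frechet"] : List String) then config.insert "distribution" true else config
      let config := if family ∈ (["stability", "sun"] : List String) then config.insert "stability" true else config
      let config := if family ∈ (["frechet", "distribution"] : List String) then config.insert "embeddings" true else config
      let config := if family ∈ (["novelty", "uniqueness", "sun"] : List String) then
          (if PySem.Str.lower fm ∉ (["structure-matcher"] : List String) then config.insert "fingerprint" true else config)
        else config
      config)
      (PySem.Dict.mk [("validity", true), ("distribution", d), ("stability", s), ("embeddings", e), ("fingerprint", f)])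
    = PySem.Dict.mk [("validity", true),
        ("distribution", d || l.any (fun x => decide (x ∈ (["distribution", "jsdistance", "mmd", "frechet"] : List String)))),
        ("stability", s || l.any (fun x => decide (x ∈ (["stability", "sun"] : List String)))),
        ("embeddings", e || l.any (fun x => decide (x ∈ (["frechet", "distribution"] : List String)))),
        ("fingerprint", f || (l.any (fun x => decide (x ∈ (["novelty", "uniqueness", "sun"] : List String)))
            && !(decide (PySem.Str.lower fm ∈ (["structure-matcher"] : List String)))))] := by
  induction l generalizing d s e f with
  | nil => simp
  | cons x xs ih =>
    rw [List.foldl_cons, one_step, ih]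
    simp [Bool.or_assoc, Bool.and_or_distrib_right]

-- B-side: membership in the accumulated enabled-set
lemma mem_enabled_fold (g : String) (l : List String) (s : PySem.Set String) :
    g ∈ l.foldl (fun s family => PySem.Set.update s (pvFamilyFlags.getD family [])) s
    ↔ g ∈ s ∨ ∃ f ∈ l, g ∈ pvFamilyFlags.getD f [] := by
  induction l generalizing s with
  | nil => simp
  | cons x xs ih =>
    rw [List.foldl_cons, ih, PySem.Set.mem_update]
    simp [or_assoc]

-- B-side: the index table's rows invert the four membership lists
lemma flag_row (f : String) :
    ("distribution" ∈ pvFamilyFlags.getD f [] ↔ f ∈ (["distribution", "jsdistance", "mmd", "frechet"] : List String))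
    ∧ ("stability" ∈ pvFamilyFlags.getD f [] ↔ f ∈ (["stability", "sun"] : List String))
    ∧ ("embeddings" ∈ pvFamilyFlags.getD f [] ↔ f ∈ (["frechet", "distribution"] : List String))
    ∧ ("fingerprint" ∈ pvFamilyFlags.getD f [] ↔ f ∈ (["novelty", "uniqueness", "sun"] : List String)) := by
  by_cases h1 : f = "distribution"
  · subst h1; decide
  by_cases h2 : f = "jsdistance"
  · subst h2; decide
  by_cases h3 : f = "mmd"
  · subst h3; decide
  by_cases h4 : f = "frechet"
  · subst h4; decide
  by_cases h5 : f = "stability"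
  · subst h5; decide
  by_cases h6 : f = "sun"
  · subst h6; decide
  by_cases h7 : f = "novelty"
  · subst h7; decide
  by_cases h8 : f = "uniqueness"
  · subst h8; decide
  have hnone : pvFamilyFlags.getD f ([] : List String) = [] := by
    rw [show pvFamilyFlags = PySem.Dict.mk
        [("distribution", ["distribution", "embeddings"]),
         ("jsdistance", ["distribution"]),
         ("mmd", ["distribution"]),
         ("frechet", ["distribution", "embeddings"]),
         ("stability", ["stability"]),
         ("sun", ["stability", "fingerprint"]),
         ("novelty", ["fingerprint"]),
         ("uniqueness", ["fingerprint"])] from by decide]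
    simp only [PySem.Dict.getD, PySem.Dict.get?]
    rw [List.find?_eq_none.mpr]
    · rfl
    · intro x hx
      fin_cases hx <;> simp only [beq_iff_eq] <;> intro h <;>
        first
        | exact h1 h.symm | exact h2 h.symm | exact h3 h.symm | exact h4 h.symm
        | exact h5 h.symm | exact h6 h.symm | exact h7 h.symm | exact h8 h.symm
  rw [hnone]
  simp [h1, h2, h3, h4, h5, h6, h7, h8]

lemma enabled_flag (g : String) (l : List String) (fams : List String)
    (hrow : ∀ f, g ∈ pvFamilyFlags.getD f [] ↔ f ∈ fams) :
    decide (g ∈ l.foldl (fun s family => PySem.Set.update s (pvFamilyFlags.getD family [])) PySem.Set.empty)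
    = l.any (fun x => decide (x ∈ fams)) := by
  rw [Bool.eq_iff_iff, decide_eq_true_iff, List.any_eq_true, mem_enabled_fold]
  constructor
  · rintro (h | ⟨f, hf, hg⟩)
    · cases h
    · exact ⟨f, hf, by simpa using (hrow f).mp hg⟩
  · rintro ⟨f, hf, hg⟩
    exact Or.inr ⟨f, hf, (hrow f).mpr (by simpa using hg)⟩

-- ===== VERDICT =====
theorem create_preprocessor_config_spec : Claim_equal_create_preprocessor_config := by
  intro l fm g _
  unfold Spec_create_preprocessor_config create_preprocessor_config create_preprocessor_config_alt
  simp only []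
  rw [show (PySem.Dict.ofList [("validity", true), ("distribution", false), ("stability", false), ("embeddings", false), ("fingerprint", false)] : PySem.Dict String Bool)
      = PySem.Dict.mk [("validity", true), ("distribution", false), ("stability", false), ("embeddings", false), ("fingerprint", false)] from by decide]
  rw [foldA fm l false false false false]
  rw [enabled_flag _ _ _ (fun f => (flag_row f).1),
      enabled_flag _ _ _ (fun f => (flag_row f).2.1),
      enabled_flag _ _ _ (fun f => (flag_row f).2.2.1),
      enabled_flag _ _ _ (fun f => (flag_row f).2.2.2)]
  rcases g with _ | _
  · simp
  · rw [if_pos rfl, step_insert _ _ _ _ _ _ (by decide)]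
    simp
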